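-- pv_equiv track=rewrite | github.com/mystmn/alpha_controller | helpers/misc.py | search_replace_list
-- ===== SOURCE A (Python) =====
-- def search_replace_list(line, x):
--     '''
--         Find character and replace
--         if character is combined within two strings it appends both
--         to a list
--         :return class {i: value}
--     '''
--
--     new_line = []
--     i = 0
--
--     #  if x in str([words for words in line]):
--
--     for words in line:
--         i += 1
--         if x in str(words):
--             found_x = words.find(x)
--
--             before, after = words[:found_x], words[found_x + 1:]
--
--             new_line.append({i: before})
--
--             i += 1
--             new_line.append({i: after})
--
--         else:
--             new_line.append({i: words})
--
--     return new_line
-- ===== SOURCE B (Python) =====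
-- def search_replace_list(line, x):
--     # Back-to-front construction: count total output tokens first, then walk the
--     # list in reverse, assigning keys downward from the total, and reverse at the end.
--     n = sum(2 if x in str(w) else 1 for w in line)
--     out = []
--     for w in reversed(line):
--         if x in str(w):
--             f = w.find(x)
--             out.append({n: w[f + 1:]})
--             n -= 1
--             out.append({n: w[:f]})
--             n -= 1
--         else:
--             out.append({n: w})
--             n -= 1
--     out.reverse()
--     return out
-- ===== Notes on version B (the rewrite author's own statement) =====
-- stated objective: alternative
-- what changed: Instead of A's single forward pass threading a counter upward, B first counts the total number of output tokens, then traverses the list in reverse assigning keys downward from that total, and reverses the accumulated output at the end.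
import Mathlib
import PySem

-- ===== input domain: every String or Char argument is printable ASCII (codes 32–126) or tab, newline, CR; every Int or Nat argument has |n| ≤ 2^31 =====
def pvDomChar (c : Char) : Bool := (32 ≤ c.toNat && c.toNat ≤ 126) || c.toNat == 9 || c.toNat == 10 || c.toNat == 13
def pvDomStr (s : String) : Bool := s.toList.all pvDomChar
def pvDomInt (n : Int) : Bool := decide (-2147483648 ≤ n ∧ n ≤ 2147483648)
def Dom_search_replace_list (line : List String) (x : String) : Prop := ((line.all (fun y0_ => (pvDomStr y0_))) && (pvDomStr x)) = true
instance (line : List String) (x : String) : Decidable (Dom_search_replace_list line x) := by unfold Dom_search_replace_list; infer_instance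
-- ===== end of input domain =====

-- B builds the output back-to-front: a counting prepass fixes the total number of
-- tokens, then a reverse traversal assigns keys downward and the result is reversed.
-- Objective: alternative decomposition (same cost).

-- ===== PORT A =====
-- A's forward loop threads the state (i, new_line); found_x = words.find(x),
-- before = words[:found_x], after = words[found_x+1:] are inlined.
def search_replace_list (line : List String) (x : String) : List (List (Int × String)) :=
  (line.foldl (fun st words =>
    if PySem.Str.isIn x words then
      ((st.1 + 1) + 1,
        (st.2 ++ [[(st.1 + 1, PySem.Str.slice words none (some (PySem.Str.find words x)))]]) ++
          [[((st.1 + 1) + 1, PySem.Str.slice words (some (PySem.Str.find words x + 1)) none)]])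
    else
      (st.1 + 1, st.2 ++ [[(st.1 + 1, words)]]))
    ((0 : Int), ([] : List (List (Int × String))))).2

-- ===== PORT B =====
-- n = sum(2 if x in str(w) else 1 for w in line)
def srlCount (line : List String) (x : String) : Int :=
  line.foldl (fun s w => s + (if PySem.Str.isIn x w then (2 : Int) else 1)) 0

-- the reverse loop: state (n, out); appends after with key n, then before with key n-1
def search_replace_list_alt (line : List String) (x : String) : List (List (Int × String)) :=
  ((line.reverse).foldl (fun st w =>
    if PySem.Str.isIn x w then
      (st.1 - 1 - 1,
        (st.2 ++ [[(st.1, PySem.Str.slice w (some (PySem.Str.find w x + 1)) none)]]) ++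
          [[(st.1 - 1, PySem.Str.slice w none (some (PySem.Str.find w x)))]])
    else
      (st.1 - 1, st.2 ++ [[(st.1, w)]]))
    (srlCount line x, ([] : List (List (Int × String))))).2.reverse

-- ===== PRECONDITION & SPEC =====
def Spec_search_replace_list (line : List String) (x : String) (out : List (List (Int × String))) : Prop := out = search_replace_list_alt line x
instance (line : List String) (x : String) (out : List (List (Int × String))) : Decidable (Spec_search_replace_list line x out) := by unfold Spec_search_replace_list; infer_instance

-- ===== CLAIM (what is proved, stated in full; the proofs are below) =====
def Claim_equal_search_replace_list : Prop := ∀ (line : List String) (x : String), Dom_search_replace_list line x → Spec_search_replace_list line x (search_replace_list line x)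

-- ===== LEMMAS AND PROOFS =====

-- the singleton-dict group one word contributes, numbered from i+1
def srlGroup (x : String) (i : Int) (w : String) : List (List (Int × String)) :=
  if PySem.Str.isIn x w then
    [[(i + 1, PySem.Str.slice w none (some (PySem.Str.find w x)))],
     [(i + 2, PySem.Str.slice w (some (PySem.Str.find w x + 1)) none)]]
  else [[(i + 1, w)]]

-- the canonical numbered output, starting after index i
def srlCanon (line : List String) (x : String) (i : Int) : List (List (Int × String)) :=
  match line with
  | [] => []
  | w :: rest => srlGroup x i w ++ srlCanon rest x (i + if PySem.Str.isIn x w then 2 else 1)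

lemma srlCount_cons (w : String) (rest : List String) (x : String) :
    srlCount (w :: rest) x = (if PySem.Str.isIn x w then (2:Int) else 1) + srlCount rest x := by
  unfold srlCount
  simp only [List.foldl_cons]
  have h : ∀ (l : List String) (a b : Int),
      l.foldl (fun s w => s + (if PySem.Str.isIn x w then (2:Int) else 1)) (a + b)
        = a + l.foldl (fun s w => s + (if PySem.Str.isIn x w then (2:Int) else 1)) b := by
    intro l
    induction l with
    | nil => intro a b; simp
    | cons y ys ih => intro a b; simp only [List.foldl_cons, add_assoc, ih]
  simpa using h rest (if PySem.Str.isIn x w then (2:Int) else 1) 0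

-- A's forward loop from (i, acc) produces acc ++ the canonical list from i
lemma srl_loopA (x : String) (line : List String) : ∀ (i : Int) (acc : List (List (Int × String))),
    (line.foldl (fun st words =>
      if PySem.Str.isIn x words then
        ((st.1 + 1) + 1,
          (st.2 ++ [[(st.1 + 1, PySem.Str.slice words none (some (PySem.Str.find words x)))]]) ++
            [[((st.1 + 1) + 1, PySem.Str.slice words (some (PySem.Str.find words x + 1)) none)]])
      else
        (st.1 + 1, st.2 ++ [[(st.1 + 1, words)]])) (i, acc)).2
    = acc ++ srlCanon line x i := by
  induction line with
  | nil => intro i acc; simp [srlCanon]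
  | cons w rest ih =>
    intro i acc
    simp only [List.foldl_cons, srlCanon, srlGroup]
    by_cases hw : PySem.Str.isIn x w
    · rw [if_pos hw, if_pos hw, if_pos hw, ih]
      simp only [List.append_assoc, List.cons_append, List.nil_append]
      norm_num [add_assoc]
    · rw [if_neg hw, if_neg hw, if_neg hw, ih]
      simp

-- B's reverse loop from (i + srlCount line x, acc) produces (i, acc ++ reverse of canonical from i)
lemma srl_loopB (x : String) (line : List String) : ∀ (i : Int) (acc : List (List (Int × String))),
    ((line.reverse).foldl (fun st w =>
      if PySem.Str.isIn x w then
        (st.1 - 1 - 1,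
          (st.2 ++ [[(st.1, PySem.Str.slice w (some (PySem.Str.find w x + 1)) none)]]) ++
            [[(st.1 - 1, PySem.Str.slice w none (some (PySem.Str.find w x)))]])
      else
        (st.1 - 1, st.2 ++ [[(st.1, w)]])) (i + srlCount line x, acc))
    = (i, acc ++ (srlCanon line x i).reverse) := by
  induction line with
  | nil => intro i acc; simp [srlCanon, srlCount]
  | cons w rest ih =>
    intro i acc
    rw [srlCount_cons]
    simp only [List.reverse_cons, List.foldl_append, List.foldl_cons, List.foldl_nil]
    by_cases hw : PySem.Str.isIn x w
    · simp only [hw, if_true]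
      have h2 : i + ((2:Int) + srlCount rest x) = (i + 2) + srlCount rest x := by ring
      rw [h2, ih (i + 2) acc]
      have e1 : i + 2 - 1 = i + 1 := by ring
      have e2 : i + 1 - 1 = i := by ring
      have e3 : i + 2 - 1 - 1 = i := by ring
      simp only [srlCanon, srlGroup, hw, if_true, List.reverse_cons,
        List.nil_append, List.cons_append, List.append_assoc, e1, e2]
    · simp only [hw, if_false, Bool.false_eq_true]
      have h2 : i + ((1:Int) + srlCount rest x) = (i + 1) + srlCount rest x := by ring
      rw [h2, ih (i + 1) acc]
      have e2 : i + 1 - 1 = i := by ring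
      simp only [srlCanon, srlGroup, hw, if_false, Bool.false_eq_true,
        List.reverse_cons, List.nil_append, List.cons_append, List.append_assoc, e2]

-- ===== VERDICT (by name: the statement is the Claim_ definition above) =====
theorem search_replace_list_spec : Claim_equal_search_replace_list := by
  intro line x _
  show search_replace_list line x = search_replace_list_alt line x
  unfold search_replace_list search_replace_list_alt
  rw [srl_loopA x line 0 []]
  have h := srl_loopB x line 0 []
  rw [zero_add] at h
  rw [h]
  simp
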